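-- pv_equiv track=rewrite | github.com/polirritmico/codesignal_solutions | Python/rounders.py | solution
-- ===== SOURCE A (Python) =====
-- def solution(number):
--     if number < 10:
--         return number
--     remainder = number % 10
--     number -= remainder
--     if remainder > 4:
--         number += 10
--     return solution(number//10) * 10
-- ===== SOURCE B (Python) =====
-- def solution(number):
--     if number < 10:
--         return number
--     digits = []
--     n = number
--     while n > 0:
--         digits.append(n % 10)
--         n //= 10
--     carry = 0
--     for d in digits[:-1]:
--         carry = 1 if d + carry > 4 else 0
--     return (digits[-1] + carry) * 10 ** (len(digits) - 1)
-- ===== Notes on version B (the rewrite author's own statement) =====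
-- stated objective: alternative
-- what changed: Replaces A's recursion (round last digit, recurse on n//10, multiply by 10) with two staged passes: extract the digit list, fold a rounding carry over all but the top digit, and rebuild the answer as (top digit + carry) * 10^(digits-1).
import Mathlib
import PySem

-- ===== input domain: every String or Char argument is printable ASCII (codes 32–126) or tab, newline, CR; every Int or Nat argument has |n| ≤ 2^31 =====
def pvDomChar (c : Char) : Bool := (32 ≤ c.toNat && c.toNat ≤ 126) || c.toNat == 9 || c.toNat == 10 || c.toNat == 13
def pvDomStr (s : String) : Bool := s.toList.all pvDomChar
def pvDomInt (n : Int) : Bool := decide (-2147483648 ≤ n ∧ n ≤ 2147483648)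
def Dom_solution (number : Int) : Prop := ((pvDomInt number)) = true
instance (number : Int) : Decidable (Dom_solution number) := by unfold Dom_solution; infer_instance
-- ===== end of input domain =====

-- B replaces A's recursion by two staged passes: first extract the digit list, then
-- propagate the rounding carry over it and rebuild the result with one power of 10
-- (objective: alternative decomposition, same O(digits) cost).

-- ===== PORT A =====
-- literal port of A's recursion; termination: the rounded number divided by 10 is smaller
def solution (number : Int) : Int :=
  if number < 10 then number
  else
    let remainder := PySem.Int.mod number 10
    let number1 := number - remainder
    let number2 := if remainder > 4 then number1 + 10 else number1
    solution (PySem.Int.floordiv number2 10) * 10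
termination_by number.toNat
decreasing_by
  have h10 : ¬ number < 10 := by assumption
  have hm : PySem.Int.mod number 10 = number % 10 := PySem.Int.mod_eq_emod_of_pos (by norm_num)
  have hd1 : PySem.Int.floordiv (number - number % 10 + 10) 10 = number / 10 + 1 := by
    rw [PySem.Int.floordiv_eq_ediv_of_pos (by norm_num)]; omega
  have hd2 : PySem.Int.floordiv (number - number % 10) 10 = number / 10 := by
    rw [PySem.Int.floordiv_eq_ediv_of_pos (by norm_num)]; omega
  split <;> simp only [hm, hd1, hd2] <;> omega

-- ===== PORT B =====
-- the `while n > 0` digit-extraction loop of Source B (append keeps LSB-first order)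
def digitsLoop (n : Int) (digits : List Int) : List Int :=
  if n > 0 then
    digitsLoop (PySem.Int.floordiv n 10) (digits ++ [PySem.Int.mod n 10])
  else digits
termination_by n.toNat
decreasing_by
  have h0 : n > 0 := by assumption
  have hd : PySem.Int.floordiv n 10 = n / 10 := PySem.Int.floordiv_eq_ediv_of_pos (by norm_num)
  rw [hd]; omega

-- transliteration of Source B: digit list, carry fold over digits[:-1], then rebuild.
-- digits[-1] is ported with pyGet? …(-1) (getD 0 is never taken: the list is nonempty when reached).
def solution_alt (number : Int) : Int :=
  if number < 10 then number
  else
    let digits := digitsLoop number []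
    let carry := (PySem.List.slice digits none (some (-1))).foldl
      (fun c d => if d + c > 4 then 1 else 0) (0 : Int)
    ((PySem.List.pyGet? digits (-1)).getD 0 + carry) * 10 ^ (digits.length - 1)

-- ===== PRECONDITION & SPEC =====
def Spec_solution (number : Int) (out : Int) : Prop := out = solution_alt number
instance (number : Int) (out : Int) : Decidable (Spec_solution number out) := by unfold Spec_solution; infer_instance

-- ===== CLAIM (what is proved, stated in full; the proofs are below) =====
def Claim_equal_solution : Prop := ∀ (number : Int), Dom_solution number → Spec_solution number (solution number)

-- ===== LEMMAS AND PROOFS =====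

-- proof-side pure digit list (LSB first), in terms of emod/ediv
def digitsOf (n : Int) : List Int :=
  if h : 0 < n then n % 10 :: digitsOf (n / 10) else []
termination_by n.toNat
decreasing_by omega

theorem digitsLoop_eq (n : Int) (acc : List Int) : digitsLoop n acc = acc ++ digitsOf n := by
  induction n, acc using digitsLoop.induct with
  | case1 n acc h ih =>
    rw [digitsLoop, digitsOf]
    have hm : PySem.Int.mod n 10 = n % 10 := PySem.Int.mod_eq_emod_of_pos (by norm_num)
    have hd : PySem.Int.floordiv n 10 = n / 10 := PySem.Int.floordiv_eq_ediv_of_pos (by norm_num)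
    simp only [if_pos h, dif_pos h, hm, hd] at ih ⊢
    rw [ih]; simp
  | case2 n acc h =>
    rw [digitsLoop, digitsOf]
    simp [h]

theorem digitsOf_pos_cons (n : Int) (h : 0 < n) :
    digitsOf n = n % 10 :: digitsOf (n / 10) := by
  rw [digitsOf, dif_pos h]

-- proof-side recursion processing the digit list with a carry
def procB : List Int → Int → Int
  | [], c => c
  | [d], c => d + c
  | d :: e :: ds, c => procB (e :: ds) (if d + c > 4 then 1 else 0) * 10

-- A's recursion, unrolled one digit at a time with the carry made explicit
theorem solution_eq_procB (n : Int) : ∀ c : Int, 1 ≤ n → (c = 0 ∨ c = 1) →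
    solution (n + c) = procB (digitsOf n) c := by
  induction n using digitsOf.induct with
  | case2 n hpos =>
    intro c h1 hc
    exact absurd h1 (by omega)
  | case1 n hpos ih =>
    intro c h1 hc
    by_cases hn : n < 10
    · -- n < 10: digitsOf n = [n]
      have hmod : n % 10 = n := by omega
      have hdiv : n / 10 = 0 := by omega
      rw [digitsOf_pos_cons n hpos, hmod, hdiv, digitsOf,
        dif_neg (by omega : ¬ (0:Int) < 0)]
      show solution (n + c) = n + c
      by_cases h10 : n + c < 10
      · rw [solution]; simp [h10]
      · -- n = 9, c = 1, n + c = 10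
        have hn9 : n = 9 := by omega
        have hc1 : c = 1 := by omega
        subst hn9; subst hc1
        rw [show (9:Int) + 1 = 10 by norm_num]
        have hm : PySem.Int.mod (10:Int) 10 = 0 := by
          rw [PySem.Int.mod_eq_emod_of_pos (by norm_num)]; decide
        have hf : PySem.Int.floordiv (10:Int) 10 = 1 := by
          rw [PySem.Int.floordiv_eq_ediv_of_pos (by norm_num)]; decide
        rw [solution, if_neg (by norm_num : ¬ (10:Int) < 10)]
        show solution (PySem.Int.floordiv
            (if PySem.Int.mod (10:Int) 10 > 4 then 10 - PySem.Int.mod (10:Int) 10 + 10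
             else 10 - PySem.Int.mod (10:Int) 10) 10) * 10 = 10
        rw [hm]
        norm_num [hf]
        rw [solution]; norm_num
    · -- n ≥ 10: one rounding step with carry c'
      have hpos' : (0:Int) < n / 10 := by omega
      obtain ⟨e, ds, hds⟩ : ∃ e ds, digitsOf (n / 10) = e :: ds :=
        ⟨_, _, digitsOf_pos_cons _ hpos'⟩
      rw [digitsOf_pos_cons n hpos, hds, procB]
      have hbig : ¬ n + c < 10 := by omega
      rw [solution, if_neg hbig]
      show solution (PySem.Int.floordiv
          (if PySem.Int.mod (n + c) 10 > 4
           then n + c - PySem.Int.mod (n + c) 10 + 10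
           else n + c - PySem.Int.mod (n + c) 10) 10) * 10 = _
      set c' : Int := if n % 10 + c > 4 then 1 else 0 with hc'
      have hc'01 : c' = 0 ∨ c' = 1 := by rw [hc']; split_ifs <;> simp
      have harg : PySem.Int.floordiv
          (if PySem.Int.mod (n + c) 10 > 4
           then n + c - PySem.Int.mod (n + c) 10 + 10
           else n + c - PySem.Int.mod (n + c) 10) 10 = n / 10 + c' := by
        have hm : PySem.Int.mod (n + c) 10 = (n + c) % 10 :=
          PySem.Int.mod_eq_emod_of_pos (by norm_num)
        have hfd : ∀ x : Int, PySem.Int.floordiv x 10 = x / 10 :=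
          fun x => PySem.Int.floordiv_eq_ediv_of_pos (by norm_num)
        rw [hm, hfd, hc']
        split_ifs <;> omega
      rw [harg, ih c' (by omega) hc'01, hds]

-- procB in B's "fold the carry, then rebuild" form
theorem procB_spec (ds : List Int) (c : Int) (h : ds ≠ []) :
    procB ds c = ((ds.getLast?).getD 0 +
      ds.dropLast.foldl (fun c d => if d + c > 4 then 1 else 0) c) * 10 ^ (ds.length - 1) := by
  induction ds, c using procB.induct with
  | case1 _ => exact absurd rfl h
  | case2 d c => simp [procB]
  | case3 d e ds c ih =>
    rw [procB, ih (by simp)]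
    have h1 : (d :: e :: ds).length - 1 = ((e :: ds).length - 1) + 1 := by simp
    rw [h1, pow_succ, List.getLast?_cons_cons, List.dropLast_cons₂, List.foldl_cons]
    ring

-- ===== VERDICT (by name: the statement is the Claim_ definition above) =====
theorem solution_spec : Claim_equal_solution := by
  intro number _
  unfold Spec_solution solution_alt
  by_cases h : number < 10
  · rw [solution, if_pos h, if_pos h]
  · rw [if_neg h]
    have hds : digitsLoop number [] = digitsOf number := by
      rw [digitsLoop_eq]; simp
    have hne : digitsOf number ≠ [] := by
      rw [digitsOf_pos_cons number (by omega)]; simp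
    rw [hds]
    show solution number = ((PySem.List.pyGet? (digitsOf number) (-1)).getD 0 +
      List.foldl (fun c d => if d + c > 4 then 1 else 0) 0
        (PySem.List.slice (digitsOf number) none (some (-1)))) * 10 ^ ((digitsOf number).length - 1)
    rw [PySem.List.slice_to_neg_one, PySem.List.pyGet?_neg_one]
    rw [← procB_spec _ _ hne, ← solution_eq_procB number 0 (by omega) (Or.inl rfl)]
    simp
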